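-- pv_equiv track=rewrite | github.com/Ekaterina-Koromyslova/Python | Bootcamp_1/ex03/main.py | count_figure_types
-- ===== SOURCE A (Python) =====
-- def get_bounding_box(figure_cells):
--     min_row = min(cell[0] for cell in figure_cells)
--     max_row = max(cell [0] for cell in figure_cells)
--     min_col = min(cell[1] for cell in figure_cells)
--     max_col = max(cell[1] for cell in figure_cells)
--
--     return min_row, max_row, min_col, max_col
--
-- def is_fully_filled(matrix, min_row, max_row, min_col, max_col):
--     for row in range(min_row, max_row + 1):
--         for col in range(min_col, max_col + 1):
--             if matrix[row][col] != 1: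
--                 return False
--     return True
--
-- def get_figure_type(matrix, figure_cells):
--     min_row, max_row, min_col, max_col = get_bounding_box(figure_cells)
--
--     if is_fully_filled(matrix, min_row, max_row, min_col, max_col):
--         return "square"
--     else:
--         return "circle"
--
-- def count_figure_types(matrix, figures):
--     square_count = 0
--     circle_count = 0
--
--     for figure_cells in figures:
--         figure_type = get_figure_type(matrix, figure_cells)
--
--         if figure_type == "square":
--             square_count += 1
--         else:
--             circle_count += 1
--
--     return square_count, circle_count
-- ===== SOURCE B (Python) =====
-- def _row_pref(row):
--     acc = [0]
--     for v in row:
--         acc.append(acc[-1] + (1 if v == 1 else 0))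
--     return acc
--
--
-- def count_figure_types(matrix, figures):
--     # Row-wise prefix sums of the indicator "cell == 1": each bounding-box row
--     # is tested by one prefix difference instead of a cell-by-cell scan.
--     # A bounding box that does not lie inside the grid cannot be fully filled.
--     pref = [_row_pref(row) for row in matrix]
--     square_count = 0
--     for cells in figures:
--         r0 = min(r for r, _ in cells)
--         r1 = max(r for r, _ in cells)
--         c0 = min(c for _, c in cells)
--         c1 = max(c for _, c in cells)
--         if 0 <= r0 and r1 < len(matrix) and 0 <= c0 \
--                 and all(c1 < len(matrix[r]) for r in range(r0, r1 + 1)):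
--             filled = 0
--             for r in range(r0, r1 + 1):
--                 filled += pref[r][c1 + 1] - pref[r][c0]
--             if filled == (r1 - r0 + 1) * (c1 - c0 + 1):
--                 square_count += 1
--     return square_count, len(figures) - square_count
-- ===== Notes on version B (the rewrite author's own statement) =====
-- stated objective: alternative
-- what changed: B precomputes row-wise prefix sums of the indicator 'cell == 1' once and tests each bounding box by an in-grid bounds check plus a sum of per-row prefix differences compared with the box area, instead of A's cell-by-cell rescan of every figure's box; Pre_ excludes inputs where A raises (empty figure, scan running off the grid) and the rare out-of-grid boxes A still returns on: wrapped boxes A reads as filled via negative-index wraparound (A square, B circle) and out-of-grid boxes whose first box row is clean (both answer circle).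
-- outside the precondition, e.g. on count_figure_types([[1, 0, 1]], [[(0, -1)]]): A returns (1, 0), B returns (0, 1); on count_figure_types([[1, 1], [0, 5]], [[(0, 0), (2, 1)]]): A returns (0, 1), B returns (0, 1)
import Mathlib
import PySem

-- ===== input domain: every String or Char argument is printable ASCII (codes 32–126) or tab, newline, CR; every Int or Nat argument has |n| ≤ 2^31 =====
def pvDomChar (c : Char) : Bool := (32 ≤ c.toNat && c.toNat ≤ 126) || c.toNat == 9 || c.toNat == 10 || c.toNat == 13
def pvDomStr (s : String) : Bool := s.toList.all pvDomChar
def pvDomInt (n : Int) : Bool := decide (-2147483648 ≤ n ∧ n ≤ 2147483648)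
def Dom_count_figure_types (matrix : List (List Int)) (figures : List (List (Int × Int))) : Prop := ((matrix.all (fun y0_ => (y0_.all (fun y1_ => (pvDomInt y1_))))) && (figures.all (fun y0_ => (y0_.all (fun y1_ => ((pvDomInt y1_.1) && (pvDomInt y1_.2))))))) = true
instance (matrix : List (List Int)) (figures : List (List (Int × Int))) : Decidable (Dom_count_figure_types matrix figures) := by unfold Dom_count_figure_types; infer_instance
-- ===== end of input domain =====

-- ===== PORT A =====
-- B replaces A's per-figure cell-by-cell rescan of the bounding box by row prefix sums plus an in-grid bounds check (objective: alternative).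

-- min(...) / max(...) over a list of ints (Python builtins, shared by both ports)
def pyMin? (l : List Int) : Option Int := PySem.List.min? l (fun x => x)
def pyMax? (l : List Int) : Option Int := PySem.List.max? l (fun x => x)

-- get_bounding_box; `none` = Python's ValueError on an empty figure (outside Pre_)
def get_bounding_box (cells : List (Int × Int)) : Option (Int × Int × Int × Int) :=
  match pyMin? (cells.map Prod.fst), pyMax? (cells.map Prod.fst),
        pyMin? (cells.map Prod.snd), pyMax? (cells.map Prod.snd) with
  | some a, some b, some c, some d => some (a, b, c, d)
  | _, _, _, _ => none

-- matrix[row][col] != 1 test; `false` on the `none` arms = Python's IndexError (outside Pre_)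
def cellIsOne (matrix : List (List Int)) (r c : Int) : Bool :=
  match PySem.List.pyGet? matrix r with
  | none => false
  | some row =>
    match PySem.List.pyGet? row c with
    | none => false
    | some v => v == 1

-- the inner `for col in range(...)` loop with its early `return False`
-- (fuel = the number of remaining iterations; `&&` short-circuits like the early return)
def colsLoop (matrix : List (List Int)) (r maxC : Int) (c : Int) : Nat → Bool
  | 0 => true
  | fuel + 1 => cellIsOne matrix r c && colsLoop matrix r maxC (c + 1) fuel

-- the outer `for row in range(...)` loop
def rowsLoop (matrix : List (List Int)) (minC maxC : Int) (r : Int) : Nat → Bool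
  | 0 => true
  | fuel + 1 =>
    colsLoop matrix r maxC minC (maxC + 1 - minC).toNat
      && rowsLoop matrix minC maxC (r + 1) fuel

def is_fully_filled (matrix : List (List Int)) (minR maxR minC maxC : Int) : Bool :=
  rowsLoop matrix minC maxC minR (maxR + 1 - minR).toNat

def get_figure_type (matrix : List (List Int)) (cells : List (Int × Int)) : String :=
  match get_bounding_box cells with
  | some (a, b, c, d) => if is_fully_filled matrix a b c d then "square" else "circle"
  | none => "circle"   -- unreachable under Pre_ (Python raises on an empty figure)

def count_figure_types (matrix : List (List Int)) (figures : List (List (Int × Int))) : Int × Int :=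
  figures.foldl
    (fun (st : Int × Int) cells =>
      if get_figure_type matrix cells == "square" then (st.1 + 1, st.2) else (st.1, st.2 + 1))
    (0, 0)

-- ===== PORT B =====
-- _row_pref: prefix sums of the indicator "v == 1"; acc[-1] is pyGetD acc (-1) 0
def rowPref (row : List Int) : List Int :=
  row.foldl
    (fun acc v => acc ++ [PySem.List.pyGetD acc (-1) 0 + (if v == 1 then (1 : Int) else 0)])
    [0]

-- the `for r in range(r0, r1 + 1)` accumulation loop of _box_filled;
-- `none` = Python's IndexError on pref[r] / pref[r][..] (the loop raises and stops there)
def boxLoop (pref : List (List Int)) (c0 c1 : Int) (filled r : Int) : Nat → Option Int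
  | 0 => some filled
  | fuel + 1 =>
    match PySem.List.pyGet? pref r with
    | none => none
    | some p =>
      match PySem.List.pyGet? p (c1 + 1), PySem.List.pyGet? p c0 with
      | some hi, some lo => boxLoop pref c0 c1 (filled + (hi - lo)) (r + 1) fuel
      | _, _ => none

-- one figure of B's main loop: `if <box inside the grid>: filled = ...; if filled == area: ...`
def boxFilled (matrix pref : List (List Int)) (cells : List (Int × Int)) : Bool :=
  match pyMin? (cells.map Prod.fst), pyMax? (cells.map Prod.fst),
        pyMin? (cells.map Prod.snd), pyMax? (cells.map Prod.snd) with
  | some r0, some r1, some c0, some c1 =>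
    (decide (0 ≤ r0) && decide (r1 < (matrix.length : Int)) && decide (0 ≤ c0) &&
      (PySem.List.pyRange r0 (r1 + 1) 1).all
        (fun r => decide (c1 < ((PySem.List.pyGetD matrix r []).length : Int))))
    && (match boxLoop pref c0 c1 0 r0 (r1 + 1 - r0).toNat with
        | some filled => filled == (r1 - r0 + 1) * (c1 - c0 + 1)
        | none => false)   -- unreachable: inside the grid the loop never raises
  | _, _, _, _ => false   -- Python raises on an empty figure (outside Pre_)

def count_figure_types_alt (matrix : List (List Int)) (figures : List (List (Int × Int))) : Int × Int :=
  let pref := matrix.map rowPref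
  let square := figures.foldl
    (fun (sq : Int) cells => if boxFilled matrix pref cells then sq + 1 else sq) 0
  (square, (figures.length : Int) - square)

-- ===== PRECONDITION & SPEC =====
-- One figure is acceptable iff it is nonempty and either its whole bounding box lies inside the
-- grid, or the first (Python-resolvable) row of the box provably makes A answer "circle": it holds
-- a value ≠ 1 at a scan position A reaches without running off the row.
def figOK (matrix : List (List Int)) (cells : List (Int × Int)) : Bool :=
  match pyMin? (cells.map Prod.fst), pyMax? (cells.map Prod.fst),
        pyMin? (cells.map Prod.snd), pyMax? (cells.map Prod.snd) with
  | some r0, some r1, some c0, some c1 =>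
    (decide (0 ≤ r0) && decide (r1 < (matrix.length : Int)) && decide (0 ≤ c0) &&
      (PySem.List.pyRange r0 (r1 + 1) 1).all
        (fun r => decide (c1 < ((PySem.List.pyGetD matrix r []).length : Int))))
    ||
    (match PySem.List.pyGet? matrix r0 with
     | some row =>
       decide (-(row.length : Int) ≤ c0) &&
       (PySem.List.pyRange c0 (min (c1 + 1) (row.length : Int)) 1).any
         (fun c => match PySem.List.pyGet? row c with
           | some v => !(v == 1)
           | none => false)
     | none => false)
  | _, _, _, _ => false

-- Pre_ excludes inputs on which A raises (empty figure: ValueError; a box scan that runs off the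
-- grid before meeting a non-1 cell: IndexError) and the rare out-of-grid boxes on which A still
-- returns: boxes A reads as filled through Python's negative-index wraparound (A: square, B:
-- circle), and out-of-grid boxes whose first box row is clean so A circles only at a later row
-- (there A and B both answer circle; Pre_ is conservative).
def Pre_count_figure_types (matrix : List (List Int)) (figures : List (List (Int × Int))) : Prop :=
  figures.all (figOK matrix) = true

instance (matrix : List (List Int)) (figures : List (List (Int × Int))) : Decidable (Pre_count_figure_types matrix figures) := by unfold Pre_count_figure_types; infer_instance

def pvWitness_count_figure_types : List (List Int) × (List (List (Int × Int))) :=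
  ([[1, 0], [1, 1]], [[(0, 0)], [(0, 0), (1, 1)]])

def Spec_count_figure_types (matrix : List (List Int)) (figures : List (List (Int × Int))) (out : Int × Int) : Prop := out = count_figure_types_alt matrix figures
instance (matrix : List (List Int)) (figures : List (List (Int × Int))) (out : Int × Int) : Decidable (Spec_count_figure_types matrix figures out) := by unfold Spec_count_figure_types; infer_instance

-- ===== CLAIM (what is proved, stated in full; the proofs are below) =====
def Claim_equal_count_figure_types : Prop := ∀ (matrix : List (List Int)) (figures : List (List (Int × Int))), Dom_count_figure_types matrix figures → Pre_count_figure_types matrix figures → Spec_count_figure_types matrix figures (count_figure_types matrix figures)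

-- ===== LEMMAS AND PROOFS =====

def ind (v : Int) : Int := if v == 1 then 1 else 0

def indCount (l : List Int) : Int := (l.map ind).sum

def prefAux : List Int → Int → List Int
  | [], _ => []
  | v :: vs, s => (s + ind v) :: prefAux vs (s + ind v)

lemma rowPref_go (row acc : List Int) (s : Int) :
    row.foldl
      (fun acc v => acc ++ [PySem.List.pyGetD acc (-1) 0 + (if v == 1 then (1 : Int) else 0)])
      (acc ++ [s]) = acc ++ [s] ++ prefAux row s := by
  induction row generalizing acc s with
  | nil => simp [prefAux]
  | cons v vs ih =>
    simp only [List.foldl_cons, PySem.List.pyGetD_neg_one_append_singleton]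
    rw [show acc ++ [s] ++ [s + (if v == 1 then (1 : Int) else 0)]
          = (acc ++ [s]) ++ [s + ind v] from by simp [ind]]
    rw [ih]
    simp [prefAux]

lemma rowPref_eq (row : List Int) : rowPref row = 0 :: prefAux row 0 := by
  have h := rowPref_go row [] 0
  simpa [rowPref] using h

lemma length_prefAux (row : List Int) : ∀ s, (prefAux row s).length = row.length := by
  induction row with
  | nil => intro s; simp [prefAux]
  | cons v vs ih => intro s; simp [prefAux, ih]

lemma length_rowPref (row : List Int) : (rowPref row).length = row.length + 1 := by
  rw [rowPref_eq]; simp [length_prefAux]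

lemma prefAux_getElem? (row : List Int) : ∀ (s : Int) (i : Nat), i < row.length →
    (prefAux row s)[i]? = some (s + indCount (row.take (i + 1))) := by
  induction row with
  | nil => intro s i h; simp at h
  | cons v vs ih =>
    intro s i h
    cases i with
    | zero => simp [prefAux, indCount]
    | succ n =>
      have := ih (s + ind v) n (by simpa using Nat.lt_of_succ_lt_succ h)
      simp only [prefAux, List.getElem?_cons_succ, this, List.take_succ_cons]
      simp [indCount, add_assoc]

lemma rowPref_getElem? (row : List Int) (i : Nat) (h : i ≤ row.length) :
    (rowPref row)[i]? = some (indCount (row.take i)) := by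
  rw [rowPref_eq]
  cases i with
  | zero => simp [indCount]
  | succ n =>
    have := prefAux_getElem? row 0 n (by omega)
    simpa using this

lemma rowPref_pyGetD (row : List Int) (i : Int) (h0 : 0 ≤ i) (h1 : i ≤ (row.length : Int)) :
    PySem.List.pyGetD (rowPref row) i 0 = indCount (row.take i.toNat) := by
  rw [PySem.List.pyGetD_eq_getElem _ 0 h0 (by rw [length_rowPref]; omega)]
  have h := rowPref_getElem? row i.toNat (by omega)
  have h' := List.getElem?_eq_getElem (l := rowPref row) (i := i.toNat)
      (by rw [length_rowPref]; omega)
  rw [h'] at h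
  exact Option.some.inj h

lemma indCount_append (a b : List Int) : indCount (a ++ b) = indCount a + indCount b := by
  simp [indCount]

lemma indCount_cons (v : Int) (l : List Int) : indCount (v :: l) = ind v + indCount l := by
  simp [indCount]

lemma ind_nonneg (v : Int) : 0 ≤ ind v := by unfold ind; split <;> norm_num

lemma ind_le_one (v : Int) : ind v ≤ 1 := by unfold ind; split <;> norm_num

lemma ind_eq_one_iff (v : Int) : ind v = 1 ↔ v = 1 := by
  unfold ind; split <;> simp_all

lemma indCount_nonneg (l : List Int) : 0 ≤ indCount l := by
  induction l with
  | nil => simp [indCount]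
  | cons v vs ih => rw [indCount_cons]; have := ind_nonneg v; omega

lemma indCount_le_length (l : List Int) : indCount l ≤ (l.length : Int) := by
  induction l with
  | nil => simp [indCount]
  | cons v vs ih =>
    rw [indCount_cons]
    have := ind_le_one v
    simp only [List.length_cons]
    push_cast
    omega

lemma indCount_eq_length_iff (l : List Int) :
    indCount l = (l.length : Int) ↔ ∀ v ∈ l, v = 1 := by
  induction l with
  | nil => simp [indCount]
  | cons v vs ih =>
    have h1 := indCount_le_length vs
    have h2 := ind_le_one v
    have h3 := ind_nonneg v
    rw [indCount_cons]
    simp only [List.length_cons, List.mem_cons]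
    constructor
    · intro h
      have hv : ind v = 1 := by push_cast at h; omega
      have hvs : indCount vs = (vs.length : Int) := by push_cast at h ⊢; omega
      intro y hy
      rcases hy with rfl | hy
      · exact (ind_eq_one_iff y).mp hv
      · exact ih.mp hvs y hy
    · intro h
      have hv : ind v = 1 := (ind_eq_one_iff v).mpr (h v (Or.inl rfl))
      have hvs := ih.mpr (fun y hy => h y (Or.inr hy))
      push_cast
      omega

lemma sum_le_mul_length (l : List Int) (W : Int) (h : ∀ x ∈ l, x ≤ W) :
    l.sum ≤ W * (l.length : Int) := by
  induction l with
  | nil => simp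
  | cons x xs ih =>
    have := ih (fun y hy => h y (List.mem_cons_of_mem _ hy))
    have hx := h x (List.mem_cons_self ..)
    simp only [List.sum_cons, List.length_cons]
    push_cast
    nlinarith

-- sum of a list bounded entrywise by [0, W] equals W * length iff every entry is W
lemma sum_eq_mul_length_iff (l : List Int) (W : Int)
    (h : ∀ x ∈ l, 0 ≤ x ∧ x ≤ W) :
    l.sum = W * (l.length : Int) ↔ ∀ x ∈ l, x = W := by
  induction l with
  | nil => simp
  | cons x xs ih =>
    have hx := h x (List.mem_cons_self ..)
    have hxs : ∀ y ∈ xs, 0 ≤ y ∧ y ≤ W := fun y hy => h y (List.mem_cons_of_mem _ hy)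
    have hsum_le : xs.sum ≤ W * (xs.length : Int) := sum_le_mul_length xs W (fun y hy => (hxs y hy).2)
    have hsum_ge : 0 ≤ xs.sum := List.sum_nonneg (fun y hy => (hxs y hy).1)
    have hiff := ih hxs
    simp only [List.sum_cons, List.length_cons, List.mem_cons]
    constructor
    · intro heq
      have hxW : x = W := by push_cast at heq; nlinarith [hx.1, hx.2]
      intro y hy
      rcases hy with rfl | hy
      · exact hxW
      · exact hiff.mp (by push_cast at heq ⊢; nlinarith) y hy
    · intro hall
      have hxW := hall x (Or.inl rfl)
      have hs := hiff.mpr (fun y hy => hall y (Or.inr hy))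
      push_cast
      push_cast at hs
      nlinarith

lemma cellIsOne_eq (matrix : List (List Int)) (r c : Int)
    (hr0 : 0 ≤ r) (hrlt : r < (matrix.length : Int))
    (hc0 : 0 ≤ c) (hclt : c < ((matrix.getD r.toNat []).length : Int)) :
    cellIsOne matrix r c = ((matrix.getD r.toNat []).getD c.toNat 0 == 1) := by
  have hrn : r.toNat < matrix.length := by omega
  have hrow : matrix.getD r.toNat [] = matrix[r.toNat] := List.getD_eq_getElem _ _ hrn
  have hcn : c.toNat < (matrix[r.toNat]).length := by rw [← hrow]; omega
  have h1 : PySem.List.pyGet? matrix r = some (matrix[r.toNat]) := by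
    have : PySem.List.pyGet? matrix r = matrix[r.toNat]? := by
      conv_lhs => rw [show r = ((r.toNat : Nat) : Int) from (Int.toNat_of_nonneg hr0).symm]
      rw [PySem.List.pyGet?_natCast]
    rw [this]
    exact List.getElem?_eq_getElem hrn
  have h2 : PySem.List.pyGet? (matrix[r.toNat]) c = some ((matrix[r.toNat]).getD c.toNat 0) := by
    have : PySem.List.pyGet? (matrix[r.toNat]) c = (matrix[r.toNat])[c.toNat]? := by
      conv_lhs => rw [show c = ((c.toNat : Nat) : Int) from (Int.toNat_of_nonneg hc0).symm]
      rw [PySem.List.pyGet?_natCast]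
    rw [this, List.getElem?_eq_getElem hcn, List.getD_eq_getElem _ _ hcn]
  simp only [cellIsOne, h1, h2, hrow]

lemma pyGet?_toNat {α : Type} (xs : List α) (i : Int) (h0 : 0 ≤ i) :
    PySem.List.pyGet? xs i = xs[i.toNat]? := by
  conv_lhs => rw [show i = ((i.toNat : Nat) : Int) from (Int.toNat_of_nonneg h0).symm]
  rw [PySem.List.pyGet?_natCast]

lemma colsLoop_eq (matrix : List (List Int)) (r maxC : Int) :
    ∀ (fuel : Nat) (c : Int),
      colsLoop matrix r maxC c fuel
        = (PySem.List.pyRange c (c + fuel) 1).all (fun cc => cellIsOne matrix r cc) := by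
  intro fuel
  induction fuel with
  | zero => intro c; simp [colsLoop, PySem.List.pyRange_one_eq_nil]
  | succ f ih =>
    intro c
    rw [show (c + ((f + 1 : Nat) : Int)) = (c + 1) + (f : Nat) from by push_cast; ring]
    rw [PySem.List.pyRange_one_cons (by omega)]
    simp only [List.all_cons, colsLoop, ih (c + 1)]

lemma rowsLoop_eq (matrix : List (List Int)) (minC maxC : Int) :
    ∀ (fuel : Nat) (r : Int),
      rowsLoop matrix minC maxC r fuel
        = (PySem.List.pyRange r (r + fuel) 1).all
            (fun rr => (PySem.List.pyRange minC (maxC + 1) 1).all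
              (fun cc => cellIsOne matrix rr cc)) := by
  intro fuel
  induction fuel with
  | zero => intro r; simp [rowsLoop, PySem.List.pyRange_one_eq_nil]
  | succ f ih =>
    intro r
    rw [show (r + ((f + 1 : Nat) : Int)) = (r + 1) + (f : Nat) from by push_cast; ring]
    rw [PySem.List.pyRange_one_cons (by omega)]
    simp only [List.all_cons, rowsLoop, ih (r + 1)]
    have hcols : colsLoop matrix r maxC minC (maxC + 1 - minC).toNat
        = (PySem.List.pyRange minC (maxC + 1) 1).all (fun cc => cellIsOne matrix r cc) := by
      rw [colsLoop_eq]
      by_cases hmc : minC ≤ maxC + 1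
      · rw [show minC + (((maxC + 1 - minC).toNat : Nat) : Int) = maxC + 1 from by omega]
      · rw [PySem.List.pyRange_one_eq_nil (by omega),
            PySem.List.pyRange_one_eq_nil (by omega)]
    rw [hcols]

lemma boxLoop_eq (pref : List (List Int)) (c0 c1 : Int) (hc0 : 0 ≤ c0) :
    ∀ (fuel : Nat) (r filled : Int),
      (∀ i ∈ PySem.List.pyRange r (r + fuel) 1,
          0 ≤ i ∧ i < (pref.length : Int) ∧ c0 < ((pref.getD i.toNat []).length : Int) ∧
          c1 + 1 < ((pref.getD i.toNat []).length : Int) ∧ 0 ≤ c1 + 1) →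
      boxLoop pref c0 c1 filled r fuel
        = some ((PySem.List.pyRange r (r + fuel) 1).foldl
            (fun s i => s + (PySem.List.pyGetD (PySem.List.pyGetD pref i []) (c1 + 1) 0
                 - PySem.List.pyGetD (PySem.List.pyGetD pref i []) c0 0)) filled) := by
  intro fuel
  induction fuel with
  | zero => intro r filled _; simp [boxLoop, PySem.List.pyRange_one_eq_nil]
  | succ f ih =>
    intro r filled hb
    have hr : r ∈ PySem.List.pyRange r (r + ((f + 1 : Nat) : Int)) 1 :=
      PySem.List.mem_pyRange_one.mpr ⟨le_refl r, by push_cast; omega⟩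
    obtain ⟨hi0, hi1, hB0, hB1, hB2⟩ := hb r hr
    have hrn : r.toNat < pref.length := by omega
    have hgetp : PySem.List.pyGet? pref r = some (pref.getD r.toNat []) := by
      rw [pyGet?_toNat pref r hi0, List.getElem?_eq_getElem hrn,
          List.getD_eq_getElem _ _ hrn]
    have hget1 : PySem.List.pyGet? (pref.getD r.toNat []) (c1 + 1)
        = some (PySem.List.pyGetD (pref.getD r.toNat []) (c1 + 1) 0) := by
      have hlt : (c1 + 1).toNat < (pref.getD r.toNat []).length := by omega
      rw [pyGet?_toNat _ (c1 + 1) hB2, List.getElem?_eq_getElem hlt,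
          PySem.List.pyGetD_eq_getElem _ _ hB2 (by omega)]
    have hget0 : PySem.List.pyGet? (pref.getD r.toNat []) c0
        = some (PySem.List.pyGetD (pref.getD r.toNat []) c0 0) := by
      have hlt : c0.toNat < (pref.getD r.toNat []).length := by omega
      rw [pyGet?_toNat _ c0 hc0, List.getElem?_eq_getElem hlt,
          PySem.List.pyGetD_eq_getElem _ _ hc0 (by omega)]
    have hpg : PySem.List.pyGetD pref r [] = pref.getD r.toNat [] := by
      rw [PySem.List.pyGetD_eq_getElem _ _ hi0 hi1, List.getD_eq_getElem _ _ hrn]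
    rw [show (r + ((f + 1 : Nat) : Int)) = (r + 1) + (f : Nat) from by push_cast; ring]
    rw [PySem.List.pyRange_one_cons (by omega)]
    simp only [boxLoop, hgetp, hget1, hget0, List.foldl_cons, hpg]
    apply ih (r + 1)
    intro i hi
    apply hb
    rw [PySem.List.mem_pyRange_one] at hi ⊢
    push_cast at hi ⊢
    omega

lemma seg_forall (row : List Int) (a w : Nat) (hw : a + w ≤ row.length) :
    (∀ v ∈ (row.drop a).take w, v = 1) ↔ ∀ k, k < w → row.getD (a + k) 0 = 1 := by
  constructor
  · intro h k hk
    have hlt : a + k < row.length := by omega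
    rw [List.getD_eq_getElem _ _ hlt]
    apply h
    rw [List.mem_iff_getElem]
    refine ⟨k, by simp [List.length_take, List.length_drop]; omega, ?_⟩
    rw [List.getElem_take, List.getElem_drop]
  · intro h v hv
    rw [List.mem_iff_getElem] at hv
    obtain ⟨k, hk, hvk⟩ := hv
    have hkw : k < w := by simp [List.length_take, List.length_drop] at hk; omega
    have hlt : a + k < row.length := by omega
    rw [List.getElem_take, List.getElem_drop] at hvk
    have h' := h k hkw
    rw [List.getD_eq_getElem _ _ hlt] at h'
    rw [← hvk]; exact h'

lemma row_seg_count (row : List Int) (c0 c1 : Int) (hc0 : 0 ≤ c0) (hc01 : c0 ≤ c1)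
    (hlen : c1 < (row.length : Int)) :
    PySem.List.pyGetD (rowPref row) (c1 + 1) 0 - PySem.List.pyGetD (rowPref row) c0 0
      = indCount ((row.drop c0.toNat).take (c1 + 1 - c0).toNat) := by
  rw [rowPref_pyGetD row (c1 + 1) (by omega) (by omega),
      rowPref_pyGetD row c0 hc0 (by omega)]
  have hsplit : row.take (c1 + 1).toNat
      = row.take c0.toNat ++ ((row.drop c0.toNat).take ((c1 + 1).toNat - c0.toNat)) := by
    rw [← List.take_add]
    congr 1
    omega
  rw [hsplit, indCount_append, show (c1 + 1).toNat - c0.toNat = (c1 + 1 - c0).toNat from by omega]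
  ring

lemma row_seg_len (row : List Int) (c0 c1 : Int) (hc0 : 0 ≤ c0) (hc01 : c0 ≤ c1)
    (hlen : c1 < (row.length : Int)) :
    (((row.drop c0.toNat).take (c1 + 1 - c0).toNat).length : Int) = c1 - c0 + 1 := by
  simp only [List.length_take, List.length_drop]
  omega

lemma row_all_iff (matrix : List (List Int)) (r : Int) (hr0 : 0 ≤ r)
    (hrlt : r < (matrix.length : Int)) (c0 c1 : Int) (hc0 : 0 ≤ c0) (hc01 : c0 ≤ c1)
    (hlen : c1 < ((matrix.getD r.toNat []).length : Int)) :
    (((PySem.List.pyRange c0 (c1 + 1) 1).all fun c => cellIsOne matrix r c) = true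
      ↔ indCount (((matrix.getD r.toNat []).drop c0.toNat).take (c1 + 1 - c0).toNat)
          = c1 - c0 + 1) := by
  rw [List.all_eq_true]
  rw [show (c1 - c0 + 1 : Int)
        = ((((matrix.getD r.toNat []).drop c0.toNat).take (c1 + 1 - c0).toNat).length : Int)
      from (row_seg_len _ c0 c1 hc0 hc01 hlen).symm]
  rw [indCount_eq_length_iff]
  rw [seg_forall (matrix.getD r.toNat []) c0.toNat (c1 + 1 - c0).toNat (by omega)]
  constructor
  · intro h k hk
    have hcmem : (c0 + (k : Int)) ∈ PySem.List.pyRange c0 (c1 + 1) 1 :=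
      PySem.List.mem_pyRange_one.mpr ⟨by omega, by omega⟩
    have hc := h _ hcmem
    rw [cellIsOne_eq matrix r (c0 + (k : Int)) hr0 hrlt (by omega) (by omega)] at hc
    rw [show (c0 + (k : Int)).toNat = c0.toNat + k from by omega] at hc
    simpa using hc
  · intro h c hc
    rw [PySem.List.mem_pyRange_one] at hc
    rw [cellIsOne_eq matrix r c hr0 hrlt (by omega) (by omega)]
    have hk : (c - c0).toNat < (c1 + 1 - c0).toNat := by omega
    have h' := h (c - c0).toNat hk
    rw [show c0.toNat + (c - c0).toNat = c.toNat from by omega] at h'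
    simpa using h'

lemma fig_main (matrix : List (List Int)) (r0 r1 c0 c1 : Int)
    (hr0 : 0 ≤ r0) (hc0 : 0 ≤ c0) (hr01 : r0 ≤ r1) (hc01 : c0 ≤ c1)
    (hr1 : r1 < (matrix.length : Int))
    (hrowlen : ∀ r, r0 ≤ r → r ≤ r1 → c1 < ((matrix.getD r.toNat []).length : Int)) :
    is_fully_filled matrix r0 r1 c0 c1
      = (match boxLoop (matrix.map rowPref) c0 c1 0 r0 (r1 + 1 - r0).toNat with
         | some filled => filled == (r1 - r0 + 1) * (c1 - c0 + 1)
         | none => false) := by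
  have hA : is_fully_filled matrix r0 r1 c0 c1
      = (PySem.List.pyRange r0 (r1 + 1) 1).all
          (fun r => (PySem.List.pyRange c0 (c1 + 1) 1).all
            (fun c => cellIsOne matrix r c)) := by
    unfold is_fully_filled
    rw [rowsLoop_eq, show r0 + (((r1 + 1 - r0).toNat : Nat) : Int) = r1 + 1 from by omega]
  have hBL := boxLoop_eq (matrix.map rowPref) c0 c1 hc0 (r1 + 1 - r0).toNat r0 0 ?hbnd
  case hbnd =>
    intro i hi
    rw [PySem.List.mem_pyRange_one] at hi
    have hi1 : i < ((matrix.map rowPref).length : Int) := by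
      simp only [List.length_map]; omega
    have hin : i.toNat < matrix.length := by simp only [List.length_map] at hi1; omega
    have hget : (matrix.map rowPref).getD i.toNat [] = rowPref (matrix.getD i.toNat []) := by
      rw [List.getD_eq_getElem _ _ (by simpa using hin), List.getElem_map,
          List.getD_eq_getElem _ _ hin]
    have hlen := hrowlen i (by omega) (by omega)
    refine ⟨by omega, hi1, ?_, ?_, by omega⟩
    · rw [hget, length_rowPref]; omega
    · rw [hget, length_rowPref]; omega
  rw [show r0 + (((r1 + 1 - r0).toNat : Nat) : Int) = r1 + 1 from by omega] at hBL
  rw [Bool.eq_iff_iff, hA]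
  simp only [hBL]
  rw [PySem.List.foldl_add]
  have hmap : (PySem.List.pyRange r0 (r1 + 1) 1).map
      (fun r => PySem.List.pyGetD (PySem.List.pyGetD (matrix.map rowPref) r []) (c1 + 1) 0
              - PySem.List.pyGetD (PySem.List.pyGetD (matrix.map rowPref) r []) c0 0)
      = (PySem.List.pyRange r0 (r1 + 1) 1).map
      (fun r => indCount (((matrix.getD r.toNat []).drop c0.toNat).take (c1 + 1 - c0).toNat)) := by
    apply List.map_congr_left
    intro r hr
    rw [PySem.List.mem_pyRange_one] at hr
    have hrlt : r.toNat < matrix.length := by omega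
    have hpref : PySem.List.pyGetD (matrix.map rowPref) r []
        = rowPref (matrix.getD r.toNat []) := by
      rw [PySem.List.pyGetD_eq_getElem _ _ (by omega) (by simp; omega)]
      rw [List.getElem_map, List.getD_eq_getElem _ _ hrlt]
    rw [hpref]
    exact row_seg_count (matrix.getD r.toNat []) c0 c1 hc0 hc01
      (hrowlen r (by omega) (by omega))
  rw [hmap]
  have hb : ∀ x ∈ (PySem.List.pyRange r0 (r1 + 1) 1).map
      (fun r => indCount (((matrix.getD r.toNat []).drop c0.toNat).take (c1 + 1 - c0).toNat)),
      0 ≤ x ∧ x ≤ c1 - c0 + 1 := by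
    rw [List.forall_mem_map]
    intro r hr
    rw [PySem.List.mem_pyRange_one] at hr
    refine ⟨indCount_nonneg _, ?_⟩
    have h1 := indCount_le_length
      (((matrix.getD r.toNat []).drop c0.toNat).take (c1 + 1 - c0).toNat)
    have h2 := row_seg_len (matrix.getD r.toNat []) c0 c1 hc0 hc01
      (hrowlen r (by omega) (by omega))
    omega
  have hsum := sum_eq_mul_length_iff _ (c1 - c0 + 1) hb
  have hlenR : ((((PySem.List.pyRange r0 (r1 + 1) 1).map
      (fun r => indCount (((matrix.getD r.toNat []).drop c0.toNat).take
        (c1 + 1 - c0).toNat))).length : Int)) = r1 - r0 + 1 := by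
    simp only [List.length_map, PySem.List.length_pyRange_one]
    omega
  rw [hlenR] at hsum
  have hR : ((0 + ((PySem.List.pyRange r0 (r1 + 1) 1).map
      (fun r => indCount (((matrix.getD r.toNat []).drop c0.toNat).take
        (c1 + 1 - c0).toNat))).sum == (r1 - r0 + 1) * (c1 - c0 + 1)) = true)
      ↔ ∀ r ∈ PySem.List.pyRange r0 (r1 + 1) 1,
          indCount (((matrix.getD r.toNat []).drop c0.toNat).take (c1 + 1 - c0).toNat)
            = c1 - c0 + 1 := by
    rw [beq_iff_eq, zero_add, show (r1 - r0 + 1) * (c1 - c0 + 1)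
          = (c1 - c0 + 1) * (r1 - r0 + 1) from by ring, hsum, List.forall_mem_map]
  rw [hR]
  rw [List.all_eq_true]
  constructor
  · intro h r hr
    have hr' := hr
    rw [PySem.List.mem_pyRange_one] at hr'
    exact (row_all_iff matrix r (by omega) (by omega) c0 c1 hc0 hc01
      (hrowlen r (by omega) (by omega))).mp (h r hr)
  · intro h r hr
    have hr' := hr
    rw [PySem.List.mem_pyRange_one] at hr'
    exact (row_all_iff matrix r (by omega) (by omega) c0 c1 hc0 hc01
      (hrowlen r (by omega) (by omega))).mpr (h r hr)

lemma fig_bool (matrix : List (List Int)) (cells : List (Int × Int))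
    (hok : figOK matrix cells = true) :
    (get_figure_type matrix cells == "square")
      = boxFilled matrix (matrix.map rowPref) cells := by
  unfold figOK at hok
  cases hm1 : pyMin? (cells.map Prod.fst) with
  | none => rw [hm1] at hok; simp at hok
  | some r0 =>
  cases hm2 : pyMax? (cells.map Prod.fst) with
  | none => rw [hm1, hm2] at hok; simp at hok
  | some r1 =>
  cases hm3 : pyMin? (cells.map Prod.snd) with
  | none => rw [hm1, hm2, hm3] at hok; simp at hok
  | some c0 =>
  cases hm4 : pyMax? (cells.map Prod.snd) with
  | none => rw [hm1, hm2, hm3, hm4] at hok; simp at hok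
  | some c1 =>
  rw [hm1, hm2, hm3, hm4] at hok
  dsimp only [] at hok
  have hr01 : r0 ≤ r1 := by
    simpa using PySem.List.max?_isMax (by simpa [pyMax?] using hm2) r0
      (PySem.List.min?_mem (by simpa [pyMin?] using hm1))
  have hc01 : c0 ≤ c1 := by
    simpa using PySem.List.max?_isMax (by simpa [pyMax?] using hm4) c0
      (PySem.List.min?_mem (by simpa [pyMin?] using hm3))
  simp only [get_figure_type, get_bounding_box, hm1, hm2, hm3, hm4]
  simp only [boxFilled, hm1, hm2, hm3, hm4]
  by_cases hg : (decide (0 ≤ r0) && decide (r1 < (matrix.length : Int)) && decide (0 ≤ c0) &&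
      (PySem.List.pyRange r0 (r1 + 1) 1).all
        (fun r => decide (c1 < ((PySem.List.pyGetD matrix r []).length : Int)))) = true
  · -- the bounding box lies inside the grid: both sides run the filled test
    rw [hg, Bool.true_and]
    have hg' := hg
    simp only [Bool.and_eq_true, decide_eq_true_eq, List.all_eq_true] at hg'
    obtain ⟨⟨⟨h1, h2⟩, h3⟩, h4⟩ := hg'
    have hrowlen : ∀ r, r0 ≤ r → r ≤ r1 → c1 < ((matrix.getD r.toNat []).length : Int) := by
      intro r ha hb
      have hm := h4 r (PySem.List.mem_pyRange_one.mpr ⟨ha, by omega⟩)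
      rw [PySem.List.pyGetD_eq_getElem _ _ (by omega) (by omega)] at hm
      rwa [List.getD_eq_getElem _ _ (by omega)]
    have hmain := fig_main matrix r0 r1 c0 c1 h1 h3 hr01 hc01 h2 hrowlen
    rw [← hmain]
    cases hfull : is_fully_filled matrix r0 r1 c0 c1 <;> simp
  · -- the box leaves the grid: B answers "circle"; Pre_ guarantees A finds a non-1
    -- in the first box row before running off it, so A answers "circle" too
    rw [Bool.eq_false_iff.mpr hg, Bool.false_and]
    rw [Bool.eq_false_iff.mpr hg, Bool.false_or] at hok
    cases hrow : PySem.List.pyGet? matrix r0 with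
    | none => rw [hrow] at hok; simp at hok
    | some row =>
    rw [hrow] at hok
    rw [Bool.and_eq_true] at hok
    obtain ⟨_, hany⟩ := hok
    rw [List.any_eq_true] at hany
    obtain ⟨c, hcmem, hc⟩ := hany
    have hcr := PySem.List.mem_pyRange_one.mp hcmem
    cases hcell : PySem.List.pyGet? row c with
    | none => rw [hcell] at hc; simp at hc
    | some v =>
    rw [hcell] at hc
    have hv : (v == 1) = false := by simpa using hc
    have hfull : is_fully_filled matrix r0 r1 c0 c1 = false := by
      unfold is_fully_filled
      rw [rowsLoop_eq, show r0 + (((r1 + 1 - r0).toNat : Nat) : Int) = r1 + 1 from by omega]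
      rw [Bool.eq_false_iff]
      intro hall
      rw [List.all_eq_true] at hall
      have h0 := hall r0 (PySem.List.mem_pyRange_one.mpr ⟨le_refl r0, by omega⟩)
      rw [List.all_eq_true] at h0
      have h1 := h0 c (PySem.List.mem_pyRange_one.mpr ⟨by omega, by omega⟩)
      simp [cellIsOne, hrow, hcell, hv] at h1
    rw [hfull]
    simp

lemma count_fold (matrix : List (List Int)) (figs : List (List (Int × Int)))
    (h : ∀ f ∈ figs, figOK matrix f = true) (sq ci : Int) :
    figs.foldl (fun (st : Int × Int) cells =>
        if get_figure_type matrix cells == "square" then (st.1 + 1, st.2)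
        else (st.1, st.2 + 1)) (sq, ci)
      = (sq + (figs.countP (fun f => boxFilled matrix (matrix.map rowPref) f) : Int),
         ci + ((figs.length : Int)
               - (figs.countP (fun f => boxFilled matrix (matrix.map rowPref) f) : Int))) := by
  induction figs generalizing sq ci with
  | nil => simp
  | cons f fs ih =>
    have hf := h f (List.mem_cons_self ..)
    rw [List.foldl_cons, fig_bool matrix f hf]
    have ih' := ih (fun g hg => h g (List.mem_cons_of_mem _ hg))
    cases hb : boxFilled matrix (matrix.map rowPref) f
    · simp only [Bool.false_eq_true, if_false]
      rw [ih' sq (ci + 1)]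
      simp only [List.countP_cons, hb, Bool.false_eq_true, if_false, List.length_cons]
      refine Prod.ext rfl ?_
      push_cast
      ring
    · simp only [if_true]
      rw [ih' (sq + 1) ci]
      simp only [List.countP_cons, hb, if_true, List.length_cons]
      refine Prod.ext ?_ ?_ <;> · push_cast; ring

-- ===== VERDICT (by name: the statement is the Claim_ definition above) =====
theorem count_figure_types_spec : Claim_equal_count_figure_types := by
  intro matrix figures _hdom hpre
  unfold Spec_count_figure_types
  unfold Pre_count_figure_types at hpre
  rw [List.all_eq_true] at hpre
  unfold count_figure_types count_figure_types_alt
  rw [count_fold matrix figures hpre 0 0]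
  simp only [PySem.List.foldl_count_if]
  refine Prod.ext ?_ ?_ <;> simp
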